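-- pv_equiv track=rewrite | github.com/FelexHill7/RxRead | train.py | align_chars
-- ===== SOURCE A (Python) =====
-- def align_chars(pred, target):
--     """Align predicted and target strings using Levenshtein DP to get
--     character-level (true_char, pred_char) pairs including substitutions."""
--     n, m = len(target), len(pred)
--     dp = [[0] * (m + 1) for _ in range(n + 1)]
--     for i in range(n + 1):
--         dp[i][0] = i
--     for j in range(m + 1):
--         dp[0][j] = j
--     for i in range(1, n + 1):
--         for j in range(1, m + 1):
--             if target[i - 1] == pred[j - 1]:
--                 dp[i][j] = dp[i - 1][j - 1]
--             else:
--                 dp[i][j] = 1 + min(dp[i - 1][j - 1], dp[i - 1][j], dp[i][j - 1])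
--     pairs = []
--     i, j = n, m
--     while i > 0 or j > 0:
--         if i > 0 and j > 0 and (target[i - 1] == pred[j - 1] or
--                                   dp[i][j] == dp[i - 1][j - 1] + 1):
--             pairs.append((target[i - 1], pred[j - 1]))
--             i -= 1; j -= 1
--         elif i > 0 and dp[i][j] == dp[i - 1][j] + 1:
--             pairs.append((target[i - 1], "\u2205"))
--             i -= 1
--         else:
--             pairs.append(("\u2205", pred[j - 1]))
--             j -= 1
--     return list(reversed(pairs))
-- ===== SOURCE B (Python) =====
-- def align_chars(pred, target):
--     """Forward Needleman-Wunsch-style pass: each cell carries (cost, chain),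
--     where chain is a linked list (pair, parent) of the alignment so far, built
--     with the same match-first/up-before-left priority as a classic backtrace
--     would use; no dp-table backtrace loop, only two rows kept, O(1) per cell."""
--     n, m = len(target), len(pred)
--     prev = [(0, None)]
--     for j in range(1, m + 1):
--         prev.append((j, (("\u2205", pred[j - 1]), prev[j - 1][1])))
--     for i in range(1, n + 1):
--         cur = [(i, ((target[i - 1], "\u2205"), prev[0][1]))]
--         for j in range(1, m + 1):
--             dc, pc = prev[j - 1]
--             du, pu = prev[j]
--             dl, pl = cur[j - 1]
--             if target[i - 1] == pred[j - 1]: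
--                 cur.append((dc, ((target[i - 1], pred[j - 1]), pc)))
--             else:
--                 cost = 1 + min(dc, du, dl)
--                 if cost == dc + 1:
--                     cur.append((cost, ((target[i - 1], pred[j - 1]), pc)))
--                 elif cost == du + 1:
--                     cur.append((cost, ((target[i - 1], "\u2205"), pu)))
--                 else:
--                     cur.append((cost, (("\u2205", pred[j - 1]), pl)))
--         prev = cur
--     pairs = []
--     node = prev[m][1]
--     while node is not None:
--         pairs.append(node[0])
--         node = node[1]
--     return pairs[::-1]
-- ===== Notes on version B (the rewrite author's own statement) =====
-- stated objective: alternative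
-- what changed: B builds the alignment during a single forward DP pass (each cell carries its cost and a cons-chained list of alignment pairs, only two rows kept), eliminating A's full dp table and its separate backtrace while-loop.
import Mathlib
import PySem

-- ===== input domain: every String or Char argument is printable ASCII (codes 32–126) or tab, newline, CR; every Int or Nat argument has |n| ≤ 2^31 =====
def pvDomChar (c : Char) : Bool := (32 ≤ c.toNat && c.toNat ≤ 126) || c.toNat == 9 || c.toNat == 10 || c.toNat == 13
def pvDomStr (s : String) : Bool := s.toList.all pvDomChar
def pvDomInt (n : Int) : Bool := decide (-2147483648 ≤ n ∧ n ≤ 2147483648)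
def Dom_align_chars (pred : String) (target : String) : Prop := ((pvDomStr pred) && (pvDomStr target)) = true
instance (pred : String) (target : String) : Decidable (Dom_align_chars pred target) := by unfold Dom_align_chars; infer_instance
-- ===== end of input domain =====

-- B builds the alignment during the single forward DP pass (each cell carries (cost, pairs so far),
-- two rows kept), eliminating A's separate backtrace while-loop — an alternative algorithm, same asymptotic cost.


-- ===== PORT A =====
-- A's forward fill: preallocated (n+1)×(m+1) table of 0s, border init loops, then the nested fill loops,
-- mutation 'dp[i][j] = v' ported as List.set (indices are always in range in A, so getD is exact).
def fillA (t p : List Char) : List (List Int) :=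
  let n := t.length
  let m := p.length
  let dp0 := (List.range (n+1)).map (fun _ => List.replicate (m+1) (0:Int))
  let dp1 := (List.range (n+1)).foldl (fun dp i => dp.set i ((dp.getD i []).set 0 (i:Int))) dp0
  let dp2 := (List.range (m+1)).foldl (fun dp j => dp.set 0 ((dp.getD 0 []).set j (j:Int))) dp1
  (List.range' 1 n).foldl (fun dp i =>
    (List.range' 1 m).foldl (fun dp j =>
      let v := if t.getD (i-1) ' ' = p.getD (j-1) ' ' then (dp.getD (i-1) []).getD (j-1) 0
               else 1 + min ((dp.getD (i-1) []).getD (j-1) 0)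
                        (min ((dp.getD (i-1) []).getD j 0) ((dp.getD i []).getD (j-1) 0))
      dp.set i ((dp.getD i []).set j v)) dp) dp2

-- A's backtrace while-loop; fuel = i+j bounds the iteration count exactly (each step decrements i+j by 1).
def btA (t p : List Char) (dp : List (List Int)) : Nat → Nat → Nat → List (String × String) → List (String × String)
  | 0, _, _, pairs => pairs
  | fuel+1, i, j, pairs =>
    if i = 0 ∧ j = 0 then pairs
    else if 0 < i ∧ 0 < j ∧ (t.getD (i-1) ' ' = p.getD (j-1) ' ' ∨
            (dp.getD i []).getD j 0 = (dp.getD (i-1) []).getD (j-1) 0 + 1) then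
      btA t p dp fuel (i-1) (j-1) (pairs ++ [(String.ofList [t.getD (i-1) ' '], String.ofList [p.getD (j-1) ' '])])
    else if 0 < i ∧ (dp.getD i []).getD j 0 = (dp.getD (i-1) []).getD j 0 + 1 then
      btA t p dp fuel (i-1) j (pairs ++ [(String.ofList [t.getD (i-1) ' '], "∅")])
    else
      btA t p dp fuel i (j-1) (pairs ++ [("∅", String.ofList [p.getD (j-1) ' '])])

def align_chars (pred : String) (target : String) : List (String × String) :=
  (btA target.toList pred.toList (fillA target.toList pred.toList)
    (target.toList.length + pred.toList.length) target.toList.length pred.toList.length []).reverse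

-- ===== PORT B =====
-- B keeps one row of (cost, chain) cells, the chain being the linked pair list ('pair :: parent',
-- most recent pair first) of the alignment so far; decodeB is the final chain walk + [::-1].
def fillB (t p : List Char) : List (Int × List (String × String)) :=
  let row0 := (List.range' 1 p.length).foldl
    (fun prev (j : Nat) => prev ++
      [((j:Int), (("∅":String), String.ofList [p.getD (j-1) ' ']) :: (prev.getD (j-1) ((0:Int), [])).2)])
    [((0:Int), ([] : List (String × String)))]
  (List.range' 1 t.length).foldl (fun prev i =>
    (List.range' 1 p.length).foldl (fun cur j =>
      let dc := prev.getD (j-1) ((0:Int), [])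
      let du := prev.getD j ((0:Int), [])
      let dl := cur.getD (j-1) ((0:Int), [])
      if t.getD (i-1) ' ' = p.getD (j-1) ' ' then
        cur ++ [(dc.1, (String.ofList [t.getD (i-1) ' '], String.ofList [p.getD (j-1) ' ']) :: dc.2)]
      else
        let cost := 1 + min dc.1 (min du.1 dl.1)
        if cost = dc.1 + 1 then
          cur ++ [(cost, (String.ofList [t.getD (i-1) ' '], String.ofList [p.getD (j-1) ' ']) :: dc.2)]
        else if cost = du.1 + 1 then
          cur ++ [(cost, (String.ofList [t.getD (i-1) ' '], ("∅":String)) :: du.2)]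
        else
          cur ++ [(cost, (("∅":String), String.ofList [p.getD (j-1) ' ']) :: dl.2)])
      [((i:Int), (String.ofList [t.getD (i-1) ' '], ("∅":String)) :: (prev.getD 0 ((0:Int), [])).2)]
  ) row0

-- the final while-loop walking the chain, then pairs[::-1]
def decodeB (node : List (String × String)) (pairs : List (String × String)) : List (String × String) :=
  match node with
  | [] => pairs.reverse
  | x :: rest => decodeB rest (pairs ++ [x])

def align_chars_alt (pred : String) (target : String) : List (String × String) :=
  decodeB ((fillB target.toList pred.toList).getD pred.toList.length ((0:Int), [])).2 []

-- ===== PRECONDITION & SPEC =====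
def Spec_align_chars (pred : String) (target : String) (out : List (String × String)) : Prop := out = align_chars_alt pred target
instance (pred : String) (target : String) (out : List (String × String)) : Decidable (Spec_align_chars pred target out) := by unfold Spec_align_chars; infer_instance

-- ===== CLAIM (what is proved, stated in full; the proofs are below) =====
def Claim_equal_align_chars : Prop := ∀ (pred : String) (target : String), Dom_align_chars pred target → Spec_align_chars pred target (align_chars pred target)

-- ===== LEMMAS AND PROOFS =====

theorem pvFoldlRange'Inv {α : Type} (f : α → Nat → α) (P : Nat → α → Prop) (k a : Nat)
    (step : ∀ i x, a ≤ i → i < a + k → P i x → P (i+1) (f x i)) :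
    ∀ x, P a x → P (a+k) ((List.range' a k).foldl f x) := by
  induction k generalizing a with
  | zero => intro x h; simpa using h
  | succ k ih =>
    intro x h
    rw [List.range'_succ]
    have := ih (a+1) (fun i x hi hik hp => step i x (by omega) (by omega) hp)
      (f x a) (step a x le_rfl (by omega) h)
    simpa [Nat.add_comm, Nat.add_assoc, Nat.add_left_comm] using this

theorem pvGetD_set_eq {α : Type} (xs : List α) (i : Nat) (v d : α) (h : i < xs.length) :
    (xs.set i v).getD i d = v := by
  simp [List.getD_eq_getElem?_getD, List.getElem?_set, h]

theorem pvGetD_set_ne {α : Type} (xs : List α) {i k : Nat} (v : α) (d : α) (h : k ≠ i) :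
    (xs.set i v).getD k d = xs.getD k d := by
  simp [List.getD_eq_getElem?_getD, List.getElem?_set, (Ne.symm h)]

theorem pvGetD_append_lt {α : Type} (xs ys : List α) (k : Nat) (d : α) (h : k < xs.length) :
    (xs ++ ys).getD k d = xs.getD k d := by
  simp [List.getD_eq_getElem?_getD, List.getElem?_append_left h]

theorem pvGetD_snoc_eq {α : Type} (xs : List α) (x d : α) :
    (xs ++ [x]).getD xs.length d = x := by
  simp [List.getD_eq_getElem?_getD]

-- Mathematical edit-distance table (reference for both ports).
def dpF (t p : List Char) : Nat → Nat → Int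
  | 0, j => (j:Int)
  | i+1, 0 => ((i:Int) + 1)
  | i+1, j+1 =>
      if t.getD i ' ' = p.getD j ' ' then dpF t p i j
      else 1 + min (dpF t p i j) (min (dpF t p i (j+1)) (dpF t p (i+1) j))
  termination_by i j => (i, j)

-- The alignment (forward order) that A's backtrace produces from cell (i, j).
def traceF (t p : List Char) : Nat → Nat → List (String × String)
  | 0, 0 => []
  | i+1, 0 => traceF t p i 0 ++ [(String.ofList [t.getD i ' '], "∅")]
  | 0, j+1 => traceF t p 0 j ++ [(("∅":String), String.ofList [p.getD j ' '])]
  | i+1, j+1 =>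
      if t.getD i ' ' = p.getD j ' ' ∨ dpF t p (i+1) (j+1) = dpF t p i j + 1 then
        traceF t p i j ++ [(String.ofList [t.getD i ' '], String.ofList [p.getD j ' '])]
      else if dpF t p (i+1) (j+1) = dpF t p i (j+1) + 1 then
        traceF t p i (j+1) ++ [(String.ofList [t.getD i ' '], "∅")]
      else
        traceF t p (i+1) j ++ [(("∅":String), String.ofList [p.getD j ' '])]
  termination_by i j => (i, j)

theorem dpF_i0 (t p : List Char) (i : Nat) : dpF t p i 0 = (i:Int) := by
  cases i <;> simp [dpF]

theorem dpF_j0 (t p : List Char) (j : Nat) : dpF t p 0 j = (j:Int) := by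
  simp [dpF]

theorem btA_correct (t p : List Char) (dp : List (List Int))
    (hdp : ∀ i ≤ t.length, ∀ j ≤ p.length, (dp.getD i []).getD j 0 = dpF t p i j) :
    ∀ fuel i j, i ≤ t.length → j ≤ p.length → i + j ≤ fuel → ∀ acc,
      btA t p dp fuel i j acc = acc ++ (traceF t p i j).reverse := by
  intro fuel
  induction fuel with
  | zero =>
    intro i j hi hj hij acc
    have hi0 : i = 0 := by omega
    have hj0 : j = 0 := by omega
    subst hi0; subst hj0
    simp [btA, traceF]
  | succ f ih =>
    intro i j hi hj hij acc
    rcases i with _ | i <;> rcases j with _ | j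
    · simp [btA, traceF]
    · -- i = 0, j+1
      rw [show btA t p dp (f+1) 0 (j+1) acc
            = btA t p dp f 0 j (acc ++ [(("∅":String), String.ofList [p.getD j ' '])]) from by
          simp [btA]]
      rw [ih 0 j (by omega) (by omega) (by omega)]
      simp [traceF]
    · -- i+1, j = 0
      have h1 : (dp.getD (i+1) []).getD 0 0 = dpF t p (i+1) 0 := hdp _ hi _ (Nat.zero_le _)
      have h2 : (dp.getD i []).getD 0 0 = dpF t p i 0 := hdp _ (by omega) _ (Nat.zero_le _)
      have hcond : (dp.getD (i+1) []).getD 0 0 = (dp.getD i []).getD 0 0 + 1 := by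
        rw [h1, h2, dpF_i0, dpF_i0]; push_cast; ring
      rw [show btA t p dp (f+1) (i+1) 0 acc
            = btA t p dp f i 0 (acc ++ [(String.ofList [t.getD i ' '], ("∅":String))]) from by
          simp only [btA, Nat.add_sub_cancel]
          rw [if_neg (by omega), if_neg (fun h => absurd h.2.1 (by omega)), if_pos ⟨Nat.succ_pos i, hcond⟩]]
      rw [ih i 0 (by omega) (by omega) (by omega)]
      simp [traceF]
    · -- i+1, j+1
      have h11 : (dp.getD (i+1) []).getD (j+1) 0 = dpF t p (i+1) (j+1) := hdp _ hi _ hj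
      have h00 : (dp.getD i []).getD j 0 = dpF t p i j := hdp _ (by omega) _ (by omega)
      have h01 : (dp.getD i []).getD (j+1) 0 = dpF t p i (j+1) := hdp _ (by omega) _ hj
      by_cases hd : t.getD i ' ' = p.getD j ' ' ∨ dpF t p (i+1) (j+1) = dpF t p i j + 1
      · rw [show btA t p dp (f+1) (i+1) (j+1) acc
              = btA t p dp f i j (acc ++ [(String.ofList [t.getD i ' '], String.ofList [p.getD j ' '])]) from by
            simp only [btA]
            rw [if_neg (by omega), if_pos (by simp only [Nat.add_sub_cancel]; rw [h11, h00]; exact ⟨by omega, by omega, hd⟩)]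
            simp]
        rw [ih i j (by omega) (by omega) (by omega)]
        rw [show traceF t p (i+1) (j+1)
              = traceF t p i j ++ [(String.ofList [t.getD i ' '], String.ofList [p.getD j ' '])] from by
            rw [traceF]; rw [if_pos hd]]
        simp
      · by_cases hu : dpF t p (i+1) (j+1) = dpF t p i (j+1) + 1
        · rw [show btA t p dp (f+1) (i+1) (j+1) acc
                = btA t p dp f i (j+1) (acc ++ [(String.ofList [t.getD i ' '], ("∅":String))]) from by
              simp only [btA]
              rw [if_neg (by omega),
                  if_neg (by simp only [Nat.add_sub_cancel]; rw [h11, h00]; intro h; exact hd h.2.2),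
                  if_pos (by simp only [Nat.add_sub_cancel]; rw [h11, h01]; exact ⟨by omega, hu⟩)]
              simp]
          rw [ih i (j+1) (by omega) (by omega) (by omega)]
          rw [show traceF t p (i+1) (j+1)
                = traceF t p i (j+1) ++ [(String.ofList [t.getD i ' '], ("∅":String))] from by
              rw [traceF]; rw [if_neg hd, if_pos hu]]
          simp
        · rw [show btA t p dp (f+1) (i+1) (j+1) acc
                = btA t p dp f (i+1) j (acc ++ [(("∅":String), String.ofList [p.getD j ' '])]) from by
              simp only [btA]
              rw [if_neg (by omega),
                  if_neg (by simp only [Nat.add_sub_cancel]; rw [h11, h00]; intro h; exact hd h.2.2),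
                  if_neg (by simp only [Nat.add_sub_cancel]; rw [h11, h01]; intro h; exact hu h.2)]
              simp]
          rw [ih (i+1) j (by omega) (by omega) (by omega)]
          rw [show traceF t p (i+1) (j+1)
                = traceF t p (i+1) j ++ [(("∅":String), String.ofList [p.getD j ' '])] from by
              rw [traceF]; rw [if_neg hd, if_neg hu]]
          simp

-- Named pieces of fillB (definitionally equal to the lambdas inside it).
def row0B (t p : List Char) : List (Int × List (String × String)) :=
  (List.range' 1 p.length).foldl
    (fun prev (j : Nat) => prev ++
      [((j:Int), (("∅":String), String.ofList [p.getD (j-1) ' ']) :: (prev.getD (j-1) ((0:Int), [])).2)])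
    [((0:Int), ([] : List (String × String)))]

def cellB (t p : List Char) (prev : List (Int × List (String × String)))
    (i : Nat) (cur : List (Int × List (String × String))) (j : Nat) :
    List (Int × List (String × String)) :=
  let dc := prev.getD (j-1) ((0:Int), [])
  let du := prev.getD j ((0:Int), [])
  let dl := cur.getD (j-1) ((0:Int), [])
  if t.getD (i-1) ' ' = p.getD (j-1) ' ' then
    cur ++ [(dc.1, (String.ofList [t.getD (i-1) ' '], String.ofList [p.getD (j-1) ' ']) :: dc.2)]
  else
    let cost := 1 + min dc.1 (min du.1 dl.1)
    if cost = dc.1 + 1 then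
      cur ++ [(cost, (String.ofList [t.getD (i-1) ' '], String.ofList [p.getD (j-1) ' ']) :: dc.2)]
    else if cost = du.1 + 1 then
      cur ++ [(cost, (String.ofList [t.getD (i-1) ' '], ("∅":String)) :: du.2)]
    else
      cur ++ [(cost, (("∅":String), String.ofList [p.getD (j-1) ' ']) :: dl.2)]

def stepB (t p : List Char) (prev : List (Int × List (String × String))) (i : Nat) :
    List (Int × List (String × String)) :=
  (List.range' 1 p.length).foldl (cellB t p prev i)
    [((i:Int), (String.ofList [t.getD (i-1) ' '], ("∅":String)) :: (prev.getD 0 ((0:Int), [])).2)]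

theorem fillB_eq (t p : List Char) :
    fillB t p = (List.range' 1 t.length).foldl (stepB t p) (row0B t p) := rfl

theorem decodeB_eq (node : List (String × String)) :
    ∀ pairs, decodeB node pairs = (pairs ++ node).reverse := by
  induction node with
  | nil => intro pairs; simp [decodeB]
  | cons x rest ih => intro pairs; rw [decodeB, ih]; simp

theorem row0B_spec (t p : List Char) :
    (row0B t p).length = p.length + 1 ∧
    ∀ j ≤ p.length, (row0B t p).getD j ((0:Int), []) = (dpF t p 0 j, (traceF t p 0 j).reverse) := by
  have main := pvFoldlRange'Inv
    (fun (prev : List (Int × List (String × String))) (j : Nat) => prev ++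
      [((j:Int), (("∅":String), String.ofList [p.getD (j-1) ' ']) :: (prev.getD (j-1) ((0:Int), [])).2)])
    (fun j (prev : List (Int × List (String × String))) => prev.length = j ∧
      ∀ j' < j, prev.getD j' ((0:Int), []) = (dpF t p 0 j', (traceF t p 0 j').reverse))
    p.length 1
    (by
      rintro j prev hj1 hjm ⟨hlen, hv⟩
      obtain ⟨j', rfl⟩ : ∃ x, j = x + 1 := ⟨j - 1, by omega⟩
      simp only [Nat.add_sub_cancel]
      refine ⟨by simp [hlen], ?_⟩
      intro k hk
      rcases Nat.lt_succ_iff_lt_or_eq.mp hk with hk | hk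
      · rw [pvGetD_append_lt _ _ _ _ (by omega)]
        exact hv k hk
      · subst hk
        have hg := pvGetD_snoc_eq prev
          (((j'+1 : Nat) : Int), (("∅":String), String.ofList [p.getD j' ' ']) :: (prev.getD j' ((0:Int), [])).2)
          ((0:Int), [])
        rw [hlen] at hg
        rw [hg, hv j' (by omega)]
        refine Prod.ext ?_ ?_ <;> simp only
        · rw [dpF_j0]
        · rw [show traceF t p 0 (j'+1)
                = traceF t p 0 j' ++ [(("∅":String), String.ofList [p.getD j' ' '])] from by
              rw [traceF]]
          simp)
    [((0:Int), ([] : List (String × String)))]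
    (by
      refine ⟨by simp, ?_⟩
      intro j' hj'
      have hz : j' = 0 := by omega
      subst hz
      simp [dpF_j0, traceF])
  refine ⟨?_, ?_⟩
  · have := main.1
    unfold row0B
    omega
  · intro j hj
    have := main.2 j (by omega)
    simpa [row0B] using this

theorem stepB_spec (t p : List Char) (prev : List (Int × List (String × String))) (i' : Nat)
    (hprev : ∀ j ≤ p.length, prev.getD j ((0:Int), []) = (dpF t p i' j, (traceF t p i' j).reverse)) :
    (stepB t p prev (i'+1)).length = p.length + 1 ∧
    ∀ j ≤ p.length, (stepB t p prev (i'+1)).getD j ((0:Int), [])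
      = (dpF t p (i'+1) j, (traceF t p (i'+1) j).reverse) := by
  have inner := pvFoldlRange'Inv (cellB t p prev (i'+1))
    (fun j (cur : List (Int × List (String × String))) => cur.length = j ∧
      ∀ j' < j, cur.getD j' ((0:Int), []) = (dpF t p (i'+1) j', (traceF t p (i'+1) j').reverse))
    p.length 1 ?istep
    [(((i'+1 : Nat) : Int), (String.ofList [t.getD (i'+1-1) ' '], ("∅":String)) :: (prev.getD 0 ((0:Int), [])).2)]
    ?iinit
  case iinit =>
    refine ⟨by simp, ?_⟩
    intro j' hj'
    have hz : j' = 0 := by omega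
    subst hz
    rw [show (List.getD
        [(((i'+1 : Nat) : Int), (String.ofList [t.getD (i'+1-1) ' '], ("∅":String)) :: (prev.getD 0 ((0:Int), [])).2)]
        0 ((0:Int), []))
        = (((i'+1 : Nat) : Int), (String.ofList [t.getD (i'+1-1) ' '], ("∅":String)) :: (prev.getD 0 ((0:Int), [])).2) from rfl]
    rw [hprev 0 (by omega)]
    refine Prod.ext (by show (((i'+1 : Nat) : Int)) = dpF t p (i'+1) 0; rw [dpF_i0]) ?_
    simp only [Nat.add_sub_cancel]
    rw [show traceF t p (i'+1) 0 = traceF t p i' 0 ++ [(String.ofList [t.getD i' ' '], ("∅":String))] from by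
        rw [traceF]]
    simp
  case istep =>
    rintro j cur hj1 hjm ⟨hclen, hcur⟩
    obtain ⟨j', rfl⟩ : ∃ x, j = x + 1 := ⟨j - 1, by omega⟩
    have hdc : prev.getD j' ((0:Int), []) = (dpF t p i' j', (traceF t p i' j').reverse) :=
      hprev j' (by omega)
    have hdu : prev.getD (j'+1) ((0:Int), []) = (dpF t p i' (j'+1), (traceF t p i' (j'+1)).reverse) :=
      hprev (j'+1) (by omega)
    have hdl : cur.getD j' ((0:Int), []) = (dpF t p (i'+1) j', (traceF t p (i'+1) j').reverse) :=
      hcur j' (by omega)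
    have snoc_ok : ∀ (cell : Int × List (String × String)),
        cell = (dpF t p (i'+1) (j'+1), (traceF t p (i'+1) (j'+1)).reverse) →
        (cur ++ [cell]).length = j' + 1 + 1 ∧
        ∀ k < j' + 1 + 1, (cur ++ [cell]).getD k ((0:Int), [])
          = (dpF t p (i'+1) k, (traceF t p (i'+1) k).reverse) := by
      intro cell hcell
      refine ⟨by simp [hclen], ?_⟩
      intro k hk
      rcases Nat.lt_succ_iff_lt_or_eq.mp hk with hk | hk
      · rw [pvGetD_append_lt _ _ _ _ (by omega), hcur k hk]
      · subst hk
        have hg : (cur ++ [cell]).getD (j'+1) ((0:Int), []) = cell := by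
          rw [← hclen]; exact pvGetD_snoc_eq _ _ _
        rw [hg, hcell]
    show (cellB t p prev (i'+1) cur (j'+1)).length = j' + 1 + 1 ∧ _
    unfold cellB
    simp only [Nat.add_sub_cancel, hdc, hdu, hdl]
    by_cases he : t.getD i' ' ' = p.getD j' ' '
    · rw [if_pos he]
      exact snoc_ok _ (by
        refine Prod.ext ?_ ?_ <;> simp only
        · rw [dpF]; rw [if_pos he]
        · rw [show traceF t p (i'+1) (j'+1)
                = traceF t p i' j' ++ [(String.ofList [t.getD i' ' '], String.ofList [p.getD j' ' '])] from by
              rw [traceF]; rw [if_pos (Or.inl he)]]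
          simp)
    · rw [if_neg he]
      have hcost : 1 + min (dpF t p i' j') (min (dpF t p i' (j'+1)) (dpF t p (i'+1) j'))
          = dpF t p (i'+1) (j'+1) := by
        rw [dpF]; rw [if_neg he]
      by_cases h1 : 1 + min (dpF t p i' j') (min (dpF t p i' (j'+1)) (dpF t p (i'+1) j')) = dpF t p i' j' + 1
      · rw [if_pos h1]
        exact snoc_ok _ (by
          refine Prod.ext ?_ ?_ <;> simp only
          · exact hcost
          · rw [show traceF t p (i'+1) (j'+1)
                  = traceF t p i' j' ++ [(String.ofList [t.getD i' ' '], String.ofList [p.getD j' ' '])] from by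
                rw [traceF]; rw [if_pos (Or.inr (by rw [← hcost, h1]))]]
            simp)
      · rw [if_neg h1]
        by_cases h2 : 1 + min (dpF t p i' j') (min (dpF t p i' (j'+1)) (dpF t p (i'+1) j')) = dpF t p i' (j'+1) + 1
        · rw [if_pos h2]
          exact snoc_ok _ (by
            refine Prod.ext ?_ ?_ <;> simp only
            · exact hcost
            · rw [show traceF t p (i'+1) (j'+1)
                    = traceF t p i' (j'+1) ++ [(String.ofList [t.getD i' ' '], ("∅":String))] from by
                  rw [traceF]
                  rw [if_neg (by
                        rintro (h | h)
                        · exact he h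
                        · exact h1 (by rw [← hcost] at h; exact h)),
                      if_pos (by rw [← hcost, h2])]]
              simp)
        · rw [if_neg h2]
          exact snoc_ok _ (by
            refine Prod.ext ?_ ?_ <;> simp only
            · exact hcost
            · rw [show traceF t p (i'+1) (j'+1)
                    = traceF t p (i'+1) j' ++ [(("∅":String), String.ofList [p.getD j' ' '])] from by
                  rw [traceF]
                  rw [if_neg (by
                        rintro (h | h)
                        · exact he h
                        · exact h1 (by rw [← hcost] at h; exact h)),
                      if_neg (by rw [← hcost]; exact h2)]]
              simp)
  refine ⟨?_, ?_⟩
  · have := inner.1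
    unfold stepB
    omega
  · intro j hj
    have := inner.2 j (by omega)
    simpa [stepB] using this

theorem fillB_correct (t p : List Char) :
    ∀ j ≤ p.length, (fillB t p).getD j ((0:Int), []) = (dpF t p t.length j, (traceF t p t.length j).reverse) := by
  have main := pvFoldlRange'Inv (stepB t p)
    (fun i (prev : List (Int × List (String × String))) =>
      ∀ j ≤ p.length, prev.getD j ((0:Int), []) = (dpF t p (i-1) j, (traceF t p (i-1) j).reverse))
    t.length 1
    (by
      rintro i prev hi hin hprev
      obtain ⟨i', rfl⟩ : ∃ x, i = x + 1 := ⟨i - 1, by omega⟩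
      simp only [Nat.add_sub_cancel] at hprev ⊢
      exact (stepB_spec t p prev i' hprev).2)
    (row0B t p)
    (by
      intro j hj
      simpa using (row0B_spec t p).2 j hj)
  intro j hj
  have := main j hj
  rw [fillB_eq]
  simpa using this

-- Named pieces of fillA (definitionally equal to the lambdas inside it).
def dp0A (t p : List Char) : List (List Int) :=
  (List.range (t.length+1)).map (fun _ => List.replicate (p.length+1) (0:Int))

def dp1A (t p : List Char) : List (List Int) :=
  (List.range (t.length+1)).foldl (fun dp i => dp.set i ((dp.getD i []).set 0 (i:Int))) (dp0A t p)

def dp2A (t p : List Char) : List (List Int) :=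
  (List.range (p.length+1)).foldl (fun dp j => dp.set 0 ((dp.getD 0 []).set j (j:Int))) (dp1A t p)

def cellA (t p : List Char) (i : Nat) (dp : List (List Int)) (j : Nat) : List (List Int) :=
  let v := if t.getD (i-1) ' ' = p.getD (j-1) ' ' then (dp.getD (i-1) []).getD (j-1) 0
           else 1 + min ((dp.getD (i-1) []).getD (j-1) 0)
                    (min ((dp.getD (i-1) []).getD j 0) ((dp.getD i []).getD (j-1) 0))
  dp.set i ((dp.getD i []).set j v)

def rowA (t p : List Char) (dp : List (List Int)) (i : Nat) : List (List Int) :=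
  (List.range' 1 p.length).foldl (cellA t p i) dp

theorem fillA_eq (t p : List Char) :
    fillA t p = (List.range' 1 t.length).foldl (rowA t p) (dp2A t p) := rfl

def ShapeA (t p : List Char) (dp : List (List Int)) : Prop :=
  dp.length = t.length + 1 ∧ ∀ r ≤ t.length, (dp.getD r []).length = p.length + 1

theorem shape_set (t p : List Char) (dp : List (List Int)) (r c : Nat) (v : Int)
    (h : ShapeA t p dp) : ShapeA t p (dp.set r ((dp.getD r []).set c v)) := by
  obtain ⟨h1, h2⟩ := h
  refine ⟨by simpa using h1, ?_⟩
  intro r' hr'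
  by_cases hrr : r' = r
  · subst hrr
    rw [pvGetD_set_eq _ _ _ _ (by omega)]
    simpa using h2 r' hr'
  · rw [pvGetD_set_ne _ _ _ hrr]
    exact h2 r' hr'

theorem dp1A_spec (t p : List Char) :
    ShapeA t p (dp1A t p) ∧ ∀ r ≤ t.length, ((dp1A t p).getD r []).getD 0 0 = (r:Int) := by
  have h0 : ShapeA t p (dp0A t p) := by
    refine ⟨by simp [dp0A], ?_⟩
    intro r hr
    rw [dp0A, List.getD_eq_getElem?_getD, List.getElem?_map, List.getElem?_range (by omega)]
    simp
  have main := pvFoldlRange'Inv (fun dp i => dp.set i ((dp.getD i []).set 0 (i:Int)))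
    (fun i (dp : List (List Int)) => ShapeA t p dp ∧ ∀ r < i, (dp.getD r []).getD 0 0 = (r:Int))
    (t.length+1) 0
    (by
      rintro i dp _ hin ⟨hs, hv⟩
      refine ⟨shape_set t p dp i 0 (i:Int) hs, ?_⟩
      intro r hr
      by_cases hrr : r = i
      · subst hrr
        rw [pvGetD_set_eq _ _ _ _ (by have := hs.1; omega), pvGetD_set_eq _ _ _ _ (by rw [hs.2 r (by omega)]; omega)]
      · rw [pvGetD_set_ne _ _ _ hrr]
        exact hv r (by omega))
    (dp0A t p) ⟨h0, by omega⟩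
  rw [← List.range_eq_range'] at main
  refine ⟨main.1, fun r hr => main.2 r (by omega)⟩

theorem dp2A_spec (t p : List Char) :
    ShapeA t p (dp2A t p) ∧
    (∀ r ≤ t.length, 1 ≤ r → ((dp2A t p).getD r []).getD 0 0 = (r:Int)) ∧
    (∀ j ≤ p.length, ((dp2A t p).getD 0 []).getD j 0 = (j:Int)) := by
  obtain ⟨hs1, hv1⟩ := dp1A_spec t p
  have main := pvFoldlRange'Inv (fun dp j => dp.set 0 ((dp.getD 0 []).set j (j:Int)))
    (fun j (dp : List (List Int)) => ShapeA t p dp ∧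
      (∀ r ≤ t.length, 1 ≤ r → (dp.getD r []).getD 0 0 = (r:Int)) ∧
      (∀ j' < j, (dp.getD 0 []).getD j' 0 = (j':Int)))
    (p.length+1) 0
    (by
      rintro j dp _ hjn ⟨hs, hc, hv⟩
      refine ⟨shape_set t p dp 0 j (j:Int) hs, ?_, ?_⟩
      · intro r hr h1r
        rw [pvGetD_set_ne _ _ _ (by omega)]
        exact hc r hr h1r
      · intro j' hj'
        rw [pvGetD_set_eq _ _ _ _ (by have := hs.1; omega)]
        by_cases hjj : j' = j
        · subst hjj
          rw [pvGetD_set_eq _ _ _ _ (by rw [hs.2 0 (by omega)]; omega)]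
        · rw [pvGetD_set_ne _ _ _ hjj]
          exact hv j' (by omega))
    (dp1A t p) ⟨hs1, fun r hr _ => hv1 r hr, by omega⟩
  rw [← List.range_eq_range'] at main
  exact ⟨main.1, main.2.1, fun j hj => main.2.2 j (by omega)⟩

theorem rowA_spec (t p : List Char) (i' : Nat) (dp : List (List Int)) (hin : i' + 1 ≤ t.length)
    (hs : ShapeA t p dp)
    (hrows : ∀ r < i' + 1, ∀ j ≤ p.length, (dp.getD r []).getD j 0 = dpF t p r j)
    (hcol : ∀ r ≤ t.length, i' + 1 ≤ r → (dp.getD r []).getD 0 0 = (r:Int)) :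
    ShapeA t p (rowA t p dp (i'+1)) ∧
    (∀ r < i' + 2, ∀ j ≤ p.length, ((rowA t p dp (i'+1)).getD r []).getD j 0 = dpF t p r j) ∧
    (∀ r ≤ t.length, i' + 2 ≤ r → ((rowA t p dp (i'+1)).getD r []).getD 0 0 = (r:Int)) := by
  have main := pvFoldlRange'Inv (cellA t p (i'+1))
    (fun j (dp : List (List Int)) => ShapeA t p dp ∧
      (∀ r < i' + 1, ∀ j' ≤ p.length, (dp.getD r []).getD j' 0 = dpF t p r j') ∧
      (∀ r ≤ t.length, i' + 1 ≤ r → (dp.getD r []).getD 0 0 = (r:Int)) ∧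
      (∀ j' < j, ((dp.getD (i'+1) []).getD j' 0 = dpF t p (i'+1) j')))
    p.length 1
    (by
      rintro j dp hj1 hjm ⟨hs, hrows, hcol, hrow⟩
      obtain ⟨j', rfl⟩ : ∃ x, j = x + 1 := ⟨j - 1, by omega⟩
      have hdc : (dp.getD i' []).getD j' 0 = dpF t p i' j' := hrows i' (by omega) j' (by omega)
      have hdu : (dp.getD i' []).getD (j'+1) 0 = dpF t p i' (j'+1) := hrows i' (by omega) (j'+1) (by omega)
      have hdl : (dp.getD (i'+1) []).getD j' 0 = dpF t p (i'+1) j' := hrow j' (by omega)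
      have hv : (if t.getD i' ' ' = p.getD j' ' ' then (dp.getD i' []).getD j' 0
           else 1 + min ((dp.getD i' []).getD j' 0)
                    (min ((dp.getD i' []).getD (j'+1) 0) ((dp.getD (i'+1) []).getD j' 0)))
          = dpF t p (i'+1) (j'+1) := by
        rw [hdc, hdu, hdl, dpF]
      have hcell : cellA t p (i'+1) dp (j'+1)
          = dp.set (i'+1) ((dp.getD (i'+1) []).set (j'+1) (dpF t p (i'+1) (j'+1))) := by
        unfold cellA
        simp only [Nat.add_sub_cancel]
        rw [hv]
      rw [hcell]
      refine ⟨shape_set t p dp (i'+1) (j'+1) _ hs, ?_, ?_, ?_⟩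
      · intro r hr j'' hj''
        rw [pvGetD_set_ne _ _ _ (by omega)]
        exact hrows r hr j'' hj''
      · intro r hr hir
        by_cases hrr : r = i' + 1
        · subst hrr
          rw [pvGetD_set_eq _ _ _ _ (by have := hs.1; omega), pvGetD_set_ne _ _ _ (by omega)]
          exact hcol _ hr hir
        · rw [pvGetD_set_ne _ _ _ hrr]
          exact hcol r hr hir
      · intro j'' hj''
        rw [pvGetD_set_eq _ _ _ _ (by have := hs.1; omega)]
        by_cases hjj : j'' = j' + 1
        · subst hjj
          rw [pvGetD_set_eq _ _ _ _ (by rw [hs.2 (i'+1) (by omega)]; omega)]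
        · rw [pvGetD_set_ne _ _ _ hjj]
          exact hrow j'' (by omega))
    dp
    ⟨hs, hrows, hcol, by
      intro j' hj'
      have hz : j' = 0 := by omega
      subst hz
      rw [hcol (i'+1) hin le_rfl, dpF_i0]⟩
  exact ⟨main.1, by
    intro r hr j hj
    by_cases hri : r = i' + 1
    · subst hri
      exact main.2.2.2 j (by omega)
    · exact main.2.1 r (by omega) j hj, by
    intro r hr hir
    exact main.2.2.1 r hr (by omega)⟩

theorem fillA_correct (t p : List Char) :
    ∀ i ≤ t.length, ∀ j ≤ p.length, ((fillA t p).getD i []).getD j 0 = dpF t p i j := by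
  obtain ⟨hs2, hc2, hr2⟩ := dp2A_spec t p
  have main := pvFoldlRange'Inv (rowA t p)
    (fun i (dp : List (List Int)) => ShapeA t p dp ∧
      (∀ r < i, ∀ j ≤ p.length, (dp.getD r []).getD j 0 = dpF t p r j) ∧
      (∀ r ≤ t.length, i ≤ r → (dp.getD r []).getD 0 0 = (r:Int)))
    t.length 1
    (by
      rintro i dp hi1 hin ⟨hs, hrows, hcol⟩
      obtain ⟨i', rfl⟩ : ∃ x, i = x + 1 := ⟨i - 1, by omega⟩
      have h := rowA_spec t p i' dp (by omega) hs hrows hcol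
      exact ⟨h.1, h.2.1, h.2.2⟩)
    (dp2A t p)
    ⟨hs2, by
      intro r hr j hj
      have hz : r = 0 := by omega
      subst hz
      rw [hr2 j hj, dpF_j0], by
      intro r hr h1r
      exact hc2 r hr h1r⟩
  intro i hi j hj
  rw [fillA_eq]
  exact main.2.1 i (by omega) j hj

-- ===== VERDICT (by name: the statement is the Claim_ definition above) =====
theorem align_chars_spec : Claim_equal_align_chars := by
  intro pred target _
  unfold Spec_align_chars align_chars align_chars_alt
  rw [btA_correct target.toList pred.toList _ (fillA_correct _ _) _ _ _ le_rfl le_rfl le_rfl,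
      fillB_correct _ _ _ le_rfl, decodeB_eq]
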